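-- pv_equiv track=rewrite | github.com/saulc/astar | a-star.py | h303673583
-- ===== SOURCE A (Python) =====
-- def h303673583(state):
--     n = 0
--     g = 0
--     for l in state:
--         for i in l:
--             if i != 4: n += 1
--             if i == 5: g += 1
--     r = n - g*3
--     # give 'weight' to boxes in goals.
--     return r if r > 0 else 0
-- ===== SOURCE B (Python) =====
-- def h303673583(state):
--     # Weight formulation: each cell contributes 0 (a 4), -2 (a 5: counted in n
--     # but subtracting 3 via g), or 1 (anything else); sum by recursion on rows.
--     def weight(i):
--         return 0 if i == 4 else (-2 if i == 5 else 1)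
--
--     def rec(rows):
--         if not rows:
--             return 0
--         return sum(map(weight, rows[0])) + rec(rows[1:])
--
--     r = rec(state)
--     return r if r > 0 else 0
-- ===== Notes on version B (the rewrite author's own statement) =====
-- stated objective: alternative
-- what changed: Eliminates the two running counters: each cell is mapped to a single net weight (4->0, 5->-2, other->1), the weights of each row are summed, and rows are combined by structural recursion; the clamped total equals A's n-3g.
import Mathlib
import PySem

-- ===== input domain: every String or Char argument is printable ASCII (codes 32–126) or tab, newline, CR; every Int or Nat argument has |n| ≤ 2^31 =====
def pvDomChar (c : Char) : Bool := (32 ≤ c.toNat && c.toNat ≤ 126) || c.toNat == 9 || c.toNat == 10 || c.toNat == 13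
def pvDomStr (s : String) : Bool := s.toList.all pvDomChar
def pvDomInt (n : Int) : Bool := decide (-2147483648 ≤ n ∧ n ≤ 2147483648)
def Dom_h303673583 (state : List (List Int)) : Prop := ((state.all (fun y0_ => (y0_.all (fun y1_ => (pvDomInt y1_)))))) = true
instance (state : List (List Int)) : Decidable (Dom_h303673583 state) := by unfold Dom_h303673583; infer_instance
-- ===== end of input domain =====

-- B replaces A's two running counters with a per-cell net-weight map (4->0, 5->-2,
-- other->1) summed per row and combined by structural recursion (alternative; same cost).


-- ===== PORT A =====
def h303673583 (state : List (List Int)) : Int :=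
  let ng : Int × Int := state.foldl (fun p l =>
    l.foldl (fun q i =>
      let q1 := if i ≠ (4 : Int) then (q.1 + 1, q.2) else q
      if i = (5 : Int) then (q1.1, q1.2 + 1) else q1) p) (0, 0)
  let r := ng.1 - ng.2 * 3
  if r > 0 then r else 0

-- ===== PORT B =====
def pvWeight (i : Int) : Int := if i = 4 then 0 else if i = 5 then -2 else 1

def pvRecB : List (List Int) → Int
  | [] => 0
  | l :: rest => (l.map pvWeight).sum + pvRecB rest

def h303673583_alt (state : List (List Int)) : Int :=
  let r := pvRecB state
  if r > 0 then r else 0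

-- ===== PRECONDITION & SPEC =====
def Spec_h303673583 (state : List (List Int)) (out : Int) : Prop := out = h303673583_alt state
instance (state : List (List Int)) (out : Int) : Decidable (Spec_h303673583 state out) := by unfold Spec_h303673583; infer_instance

-- ===== CLAIM (what is proved, stated in full; the proofs are below) =====
def Claim_equal_h303673583 : Prop := ∀ (state : List (List Int)), Dom_h303673583 state → Spec_h303673583 state (h303673583 state)

-- ===== LEMMAS AND PROOFS =====

-- A's inner loop adds (countP (≠4), count 5) to the accumulator.
theorem inner_loop (l : List Int) (p : Int × Int) :
    l.foldl (fun q i =>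
      let q1 := if i ≠ (4 : Int) then (q.1 + 1, q.2) else q
      if i = (5 : Int) then (q1.1, q1.2 + 1) else q1) p
    = (p.1 + (l.countP (fun i => i ≠ 4) : Int), p.2 + (l.count 5 : Int)) := by
  induction l generalizing p with
  | nil => simp
  | cons x xs ih =>
    simp only [List.foldl_cons, ih, List.countP_cons, List.count_cons]
    by_cases h5 : x = (5 : Int) <;> by_cases h4 : x = (4 : Int) <;>
      simp_all [Prod.ext_iff] <;> omega

-- B's weight sum of one row, in terms of the same counts.
theorem row_weight (l : List Int) :
    (l.map pvWeight).sum = (l.countP (fun i => i ≠ 4) : Int) - (l.count 5 : Int) * 3 := by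
  induction l with
  | nil => simp
  | cons x xs ih =>
    simp only [List.map_cons, List.sum_cons, ih, List.countP_cons, List.count_cons, pvWeight]
    by_cases h5 : x = (5 : Int) <;> by_cases h4 : x = (4 : Int) <;>
      simp_all <;> push_cast <;> ring

-- A's outer loop equals B's recursion, shifted by the running n - 3g.
theorem loops_eq (state : List (List Int)) (p : Int × Int) :
    (state.foldl (fun p l =>
      l.foldl (fun q i =>
        let q1 := if i ≠ (4 : Int) then (q.1 + 1, q.2) else q
        if i = (5 : Int) then (q1.1, q1.2 + 1) else q1) p) p).1
    - (state.foldl (fun p l =>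
      l.foldl (fun q i =>
        let q1 := if i ≠ (4 : Int) then (q.1 + 1, q.2) else q
        if i = (5 : Int) then (q1.1, q1.2 + 1) else q1) p) p).2 * 3
    = p.1 - p.2 * 3 + pvRecB state := by
  induction state generalizing p with
  | nil => simp [pvRecB]
  | cons l rest ih =>
    rw [List.foldl_cons, inner_loop, ih]
    simp only [pvRecB, row_weight]
    ring

-- ===== VERDICT (by name: the statement is the Claim_ definition above) =====
theorem h303673583_spec : Claim_equal_h303673583 := by
  intro state _
  unfold Spec_h303673583 h303673583 h303673583_alt
  have h := loops_eq state (0, 0)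
  simp only at h ⊢
  rw [show (0 : Int) - 0 * 3 + pvRecB state = pvRecB state by ring] at h
  rw [h]
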